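-- pv_equiv track=rewrite | github.com/AbilashC13/module1-practice-problems-infytq | problem07.py | seed_no
-- ===== SOURCE A (Python) =====
-- def seed_no(number,ref_no):
--     #start writing your code here
--     t=number
--     while(t!=0):
--     	r=t%10
--     	number=number*r
--     	t=t//10
--     if(number==ref_no):
--     	return True
--     else:
--     	return False
-- ===== SOURCE B (Python) =====
-- def seed_no(number, ref_no):
--     digits = [int(c) for c in str(number)]
--     if 0 in digits:
--         return ref_no == 0
--     q = ref_no
--     for d in digits:
--         if q % d != 0:
--             return False
--         q //= d
--     return q == number
-- ===== Notes on version B (the rewrite author's own statement) =====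
-- stated objective: alternative
-- what changed: B inverts the data flow: instead of multiplying number by each digit (A's running product on number), it repeatedly trial-divides ref_no by the digits of number, failing early on any non-zero remainder, and finally compares the fully divided quotient with number (with a zero digit short-circuiting to ref_no == 0).
import Mathlib
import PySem

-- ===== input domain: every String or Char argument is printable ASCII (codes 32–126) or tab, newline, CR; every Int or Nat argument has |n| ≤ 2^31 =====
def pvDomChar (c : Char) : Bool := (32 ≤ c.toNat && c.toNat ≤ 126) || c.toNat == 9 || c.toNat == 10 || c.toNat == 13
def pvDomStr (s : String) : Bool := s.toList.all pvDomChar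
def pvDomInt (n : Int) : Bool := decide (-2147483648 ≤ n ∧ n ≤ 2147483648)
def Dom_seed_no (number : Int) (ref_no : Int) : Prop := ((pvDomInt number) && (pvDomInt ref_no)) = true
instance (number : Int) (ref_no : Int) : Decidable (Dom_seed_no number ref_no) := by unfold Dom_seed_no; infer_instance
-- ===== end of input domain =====

-- B inverts the data flow: instead of multiplying number by its digits, it trial-divides
-- ref_no by each digit of number (early exit on a non-zero remainder, a zero digit
-- short-circuiting to ref_no == 0) and compares the final quotient with number.


-- ===== PORT A =====
-- while(t != 0): r = t%10; number = number*r; t = t//10  — fuel only makes the loop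
-- total (it suffices for every t ≥ 0; A diverges for t < 0, excluded by Pre_).
def seedLoopA : Nat → Int → Int → Int
  | 0, _, number => number
  | fuel + 1, t, number =>
    if t = 0 then number
    else seedLoopA fuel (PySem.Int.floordiv t 10) (number * PySem.Int.mod t 10)

def seed_no (number : Int) (ref_no : Int) : Bool :=
  decide (seedLoopA (number.toNat + 1) number number = ref_no)

-- ===== PORT B =====
-- int(ch) for a single decimal digit char, ported by hand (exact for '0'..'9').
def digitVal (c : Char) : Int := (c.toNat : Int) - 48

-- for d in digits: if q % d != 0: return False; q //= d  — then return q == number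
def seedLoopB : List Int → Int → Int → Bool
  | [], q, number => decide (q = number)
  | d :: ds, q, number =>
    if PySem.Int.mod q d ≠ (0 : Int) then false
    else seedLoopB ds (PySem.Int.floordiv q d) number

def seed_no_alt (number : Int) (ref_no : Int) : Bool :=
  let digits := (PySem.Int.toChars number).map digitVal
  if digits.contains 0 then decide (ref_no = 0)
  else seedLoopB digits ref_no number

-- ===== PRECONDITION & SPEC =====
-- Pre_ excludes negative numbers: A's while-loop never terminates there (t//10 stalls at -1)
-- and B's int(c) raises ValueError on the '-' character.
def Pre_seed_no (number : Int) (ref_no : Int) : Prop := 0 ≤ number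
instance (number : Int) (ref_no : Int) : Decidable (Pre_seed_no number ref_no) := by
  unfold Pre_seed_no; infer_instance
def pvWitness_seed_no : Int × Int := (36, 648)

def Spec_seed_no (number : Int) (ref_no : Int) (out : Bool) : Prop := out = seed_no_alt number ref_no
instance (number : Int) (ref_no : Int) (out : Bool) : Decidable (Spec_seed_no number ref_no out) := by unfold Spec_seed_no; infer_instance

-- ===== CLAIM (what is proved, stated in full; the proofs are below) =====
def Claim_equal_seed_no : Prop := ∀ (number : Int) (ref_no : Int), Dom_seed_no number ref_no → Pre_seed_no number ref_no → Spec_seed_no number ref_no (seed_no number ref_no)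

-- ===== LEMMAS AND PROOFS =====

/-- Product of the decimal digits of a natural number (empty product 1 at 0). -/
def digProd (n : Nat) : Int := ((Nat.digits 10 n).map (fun d : Nat => (d : Int))).prod

theorem digProd_step (n : Nat) (hn : 0 < n) :
    digProd n = (↑(n % 10) : Int) * digProd (n / 10) := by
  unfold digProd
  rw [Nat.digits_def' (by norm_num : 1 < 10) hn]
  simp

theorem seedLoopA_eq (fuel n : Nat) (hfuel : n < fuel) (acc : Int) :
    seedLoopA fuel (n : Int) acc = acc * digProd n := by
  induction fuel generalizing n acc with
  | zero => omega
  | succ fuel ih =>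
    by_cases h0 : n = 0
    · subst h0; simp [seedLoopA, digProd]
    · have hpos : 0 < n := Nat.pos_of_ne_zero h0
      have hcast : ((n : Int)) ≠ 0 := by exact_mod_cast h0
      simp only [seedLoopA, if_neg hcast]
      have hfd : PySem.Int.floordiv (n : Int) 10 = ((n / 10 : Nat) : Int) := by
        exact_mod_cast PySem.Int.floordiv_natCast n 10
      have hmd : PySem.Int.mod (n : Int) 10 = ((n % 10 : Nat) : Int) := by
        exact_mod_cast PySem.Int.mod_natCast n 10
      rw [hfd, hmd]
      rw [ih (n / 10) (by omega) _]
      rw [digProd_step n hpos]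
      ring

theorem digitVal_digitChar (d : Nat) (hd : d < 10) :
    digitVal (Nat.digitChar d) = (d : Int) := by
  interval_cases d <;> decide

theorem toDigitsCore_eq (fuel n : Nat) (hfuel : n < fuel) (hn : 0 < n) (l : List Char) :
    Nat.toDigitsCore 10 fuel n l
      = ((Nat.digits 10 n).map Nat.digitChar).reverse ++ l := by
  induction fuel generalizing n l with
  | zero => omega
  | succ fuel ih =>
    by_cases hq : n / 10 = 0
    · have hn10 : n < 10 := by omega
      rw [Nat.toDigitsCore]
      simp only [hq]
      rw [Nat.digits_def' (by norm_num : 1 < 10) hn, hq]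
      simp [Nat.mod_eq_of_lt hn10]
    · have hcore : Nat.toDigitsCore 10 (fuel + 1) n l
          = Nat.toDigitsCore 10 fuel (n / 10) (Nat.digitChar (n % 10) :: l) := by
        rw [Nat.toDigitsCore]; simp [hq]
      rw [hcore, ih (n / 10) (by omega) (Nat.pos_of_ne_zero hq)]
      rw [Nat.digits_def' (by norm_num : 1 < 10) hn]
      simp

/-- The digit list B iterates over: `[0]` for 0, else the decimal digits most-significant first. -/
theorem map_digitVal_toChars (n : Nat) :
    (PySem.Int.toChars (n : Int)).map digitVal
      = if n = 0 then [0] else ((Nat.digits 10 n).map (fun d : Nat => (d : Int))).reverse := by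
  by_cases h0 : n = 0
  · subst h0
    norm_num [PySem.Int.toChars, Nat.toDigits, Nat.toDigitsCore, digitVal]
    decide
  · rw [if_neg h0]
    unfold PySem.Int.toChars
    rw [if_neg (not_lt.mpr (Int.natCast_nonneg n))]
    simp only [Int.toNat_natCast]
    unfold Nat.toDigits
    rw [toDigitsCore_eq (n + 1) n (by omega) (Nat.pos_of_ne_zero h0) []]
    rw [List.append_nil, List.map_reverse, List.map_map]
    congr 1
    refine List.map_congr_left fun d hd => ?_
    exact digitVal_digitChar d (Nat.digits_lt_base (by norm_num) hd)

theorem seedLoopB_eq (ds : List Int) (hpos : ∀ d ∈ ds, 0 < d) (q number : Int) :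
    seedLoopB ds q number = decide (q = number * ds.prod) := by
  induction ds generalizing q with
  | nil => simp [seedLoopB]
  | cons d ds ih =>
    have hd : 0 < d := hpos d (List.mem_cons_self ..)
    have hmod : PySem.Int.mod q d = q % d := PySem.Int.mod_eq_emod_of_pos hd
    by_cases hz : q % d = 0
    · have hdvd : d ∣ q := Int.dvd_of_emod_eq_zero hz
      simp only [seedLoopB, hmod, hz, ne_eq, not_true_eq_false, if_false]
      rw [PySem.Int.floordiv_eq_ediv_of_pos hd]
      rw [ih (fun x hx => hpos x (List.mem_cons_of_mem _ hx))]
      apply decide_eq_decide.mpr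
      constructor
      · intro h
        rw [List.prod_cons, ← Int.ediv_mul_cancel hdvd, h]
        ring
      · intro h
        rw [h, List.prod_cons]
        rw [show number * (d * ds.prod) = d * (number * ds.prod) by ring]
        exact Int.mul_ediv_cancel_left _ (by omega)
    · simp only [seedLoopB, hmod, ne_eq, hz, not_false_eq_true, if_true]
      symm
      apply decide_eq_false
      intro h
      apply hz
      rw [h, List.prod_cons]
      rw [show number * (d * ds.prod) = (number * ds.prod) * d by ring]
      exact Int.mul_emod_left _ _

-- ===== VERDICT (by name: the statement is the Claim_ definition above) =====
theorem seed_no_spec : Claim_equal_seed_no := by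
  intro number ref_no _ hpre
  unfold Spec_seed_no seed_no seed_no_alt
  obtain ⟨n, rfl⟩ : ∃ n : Nat, number = (n : Int) :=
    ⟨number.toNat, (Int.toNat_of_nonneg hpre).symm⟩
  simp only [Int.toNat_natCast]
  simp only [seedLoopA_eq (n + 1) n (Nat.lt_succ_self n)]
  rw [map_digitVal_toChars n]
  by_cases h0 : n = 0
  · subst h0
    simp [digProd]
    exact eq_comm
  · rw [if_neg h0]
    set ds := (Nat.digits 10 n).map (fun d : Nat => (d : Int)) with hds
    have hprodeq : ds.prod = digProd n := rfl
    by_cases hzero : (0 : Int) ∈ ds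
    · have hcontains : ds.reverse.contains 0 = true := by
        simpa using hzero
      rw [if_pos hcontains]
      have hprod : digProd n = 0 := hprodeq ▸ List.prod_eq_zero hzero
      rw [hprod, mul_zero]
      exact decide_eq_decide.mpr eq_comm
    · have hcontains : ¬ (ds.reverse.contains 0 = true) := by
        simpa using hzero
      rw [if_neg hcontains]
      have hpos : ∀ d ∈ ds.reverse, 0 < d := by
        intro d hd
        rw [List.mem_reverse] at hd
        rcases List.mem_map.mp hd with ⟨k, hk, rfl⟩
        have hk0 : k ≠ 0 := by
          rintro rfl
          exact hzero (by simpa using hd)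
        exact_mod_cast Nat.pos_of_ne_zero hk0
      rw [seedLoopB_eq ds.reverse hpos, List.prod_reverse, hprodeq]
      exact decide_eq_decide.mpr eq_comm
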